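-- pv_equiv track=rewrite | github.com/birc-gsa-2022/cigar-python-elvirazetterberg | src/align.py | local_align
-- ===== SOURCE A (Python) =====
-- def local_align(p: str, x: str, i: int, edits: str) -> tuple[str, str]:
--     """Align two sequences from a sequence of edits.
--
--     Args:
--         p (str): The read string we have mapped against x
--         x (str): The longer string we have mapped against
--         i (int): The location where we have an approximative match
--         edits (str): The list of edits to apply, given as a string
--
--     Returns:
--         tuple[str, str]: The two rows in the pairwise alignment
--
--     >>> local_align("ACCACAGTCATA", "GTACAGAGTACAAA", 2, "MDMMMMMMIMMMM")
--     ('ACCACAGT-CATA', 'A-CAGAGTACAAA')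
--
--     """
--     if p == '' and x == '' and edits == '':
--         return '', ''
--     elif edits == len(edits)*'M':
--         return p, x
--     else:
--         pnew = p
--         xnew = x[i:]
--         for j in range(i, len(edits)):
--             if edits[j] == 'M':
--                 continue
--             elif edits[j] == 'D':
--                 xnew = '-'.join([xnew[:j], xnew[j:]])
--             else:
--                 pnew = '-'.join([pnew[:j], pnew[j:]])
--
--         return pnew, xnew
-- ===== SOURCE B (Python) =====
-- def local_align(p: str, x: str, i: int, edits: str) -> tuple[str, str]:
--     """Single left-to-right pass: emit source characters up to each gap
--     position and append '-', joining once at the end (no quadratic string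
--     rebuilding)."""
--     if p == '' and x == '' and edits == '':
--         return '', ''
--     if all(c == 'M' for c in edits):
--         return p, x
--     m = len(edits)
--
--     def build(s: str, gap) -> str:
--         out = []
--         t = 0
--         for j in range(i, m):
--             if not gap(edits[j]):
--                 continue
--             while t < len(s) and len(out) < j:
--                 out.append(s[t])
--                 t += 1
--             out.append('-')
--         out.append(s[t:])
--         return ''.join(out)
--
--     return build(p, lambda e: e != 'M' and e != 'D'), build(x[i:], lambda e: e == 'D')
-- ===== Notes on version B (the rewrite author's own statement) =====
-- stated objective: faster
-- what changed: A repeatedly rebuilds each whole string with a slice-join per gap edit (quadratic); B makes one left-to-right pass per row, copying source characters up to each gap position into a list and joining once.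
-- outside the precondition, e.g. on local_align('BBBA', 'BABABB', -3, 'IDIMD'): A returns ('-B--BBA', 'A-B--B'), B returns ('---BBBA', '--AB-B')
import Mathlib
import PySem

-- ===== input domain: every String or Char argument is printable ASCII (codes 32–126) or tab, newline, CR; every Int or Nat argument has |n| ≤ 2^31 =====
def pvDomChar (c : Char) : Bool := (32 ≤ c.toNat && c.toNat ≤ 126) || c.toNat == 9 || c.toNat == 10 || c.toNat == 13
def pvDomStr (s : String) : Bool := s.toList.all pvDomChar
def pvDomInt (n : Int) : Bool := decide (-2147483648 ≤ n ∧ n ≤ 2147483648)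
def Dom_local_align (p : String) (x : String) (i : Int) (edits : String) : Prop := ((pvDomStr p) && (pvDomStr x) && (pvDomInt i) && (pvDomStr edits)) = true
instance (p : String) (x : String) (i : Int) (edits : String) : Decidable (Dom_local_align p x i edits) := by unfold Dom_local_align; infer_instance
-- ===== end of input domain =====

-- B replaces A's per-edit slice-join string rebuilding by one left-to-right pass per row that
-- joins once at the end (a timing run measures the speed difference).

-- ===== PORT A =====

-- '-'.join([s[:j], s[j:]])
def laInsert (j : Int) (s : List Char) : List Char :=
  PySem.List.slice s none (some j) ++ '-' :: PySem.List.slice s (some j) none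

-- for j in range(i, len(edits)): … (the loop as index recursion over the same j;
-- pyGet? none = IndexError, reachable only for negative i outside Pre_)
def laLoop (el : List Char) (m j : Int) (pn xn : List Char) : List Char × List Char :=
  if _h : j < m then
    match PySem.List.pyGet? el j with
    | none => (pn, xn)
    | some e =>
      if e = 'M' then laLoop el m (j + 1) pn xn
      else if e = 'D' then laLoop el m (j + 1) pn (laInsert j xn)
      else laLoop el m (j + 1) (laInsert j pn) xn
  else (pn, xn)
termination_by (m - j).toNat
decreasing_by all_goals omega

def local_align (p : String) (x : String) (i : Int) (edits : String) : String × String :=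
  if p.toList = [] ∧ x.toList = [] ∧ edits.toList = [] then ("", "")
  else if edits.toList = List.replicate edits.toList.length 'M' then (p, x)
  else
    let r := laLoop edits.toList (edits.toList.length : Int) i p.toList
               (PySem.List.slice x.toList (some i) none)
    (String.mk r.1, String.mk r.2)

-- ===== PORT B =====

-- the inner 'while t < len(s) and len(out) < j' (rest stands for s[t:])
def fillTo (j : Int) (out rest : List Char) : List Char × List Char :=
  match rest with
  | [] => (out, [])
  | c :: cs => if (out.length : Int) < j then fillTo j (out ++ [c]) cs else (out, c :: cs)

-- B's 'for j in range(i, m)' pass for one row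
def blLoop (el : List Char) (gap : Char → Bool) (m j : Int) (out rest : List Char) : List Char :=
  if _h : j < m then
    match PySem.List.pyGet? el j with
    | none => out ++ rest
    | some e =>
      if gap e then
        let s := fillTo j out rest
        blLoop el gap m (j + 1) (s.1 ++ ['-']) s.2
      else blLoop el gap m (j + 1) out rest
  else out ++ rest
termination_by (m - j).toNat
decreasing_by all_goals omega

def local_align_alt (p : String) (x : String) (i : Int) (edits : String) : String × String :=
  if p.toList = [] ∧ x.toList = [] ∧ edits.toList = [] then ("", "")
  else if edits.toList.all (· == 'M') then (p, x)
  else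
    let el := edits.toList
    let m : Int := el.length
    (String.mk (blLoop el (fun e => !(e == 'M') && !(e == 'D')) m i [] p.toList),
     String.mk (blLoop el (fun e => e == 'D') m i [] (PySem.List.slice x.toList (some i) none)))

-- ===== PRECONDITION & SPEC =====
-- Pre_ excludes inputs with negative i that reach A's edit loop: there A inserts gaps at
-- negative positions via Python's negative-slice wraparound, an accident of A's slice-join
-- implementation, while B's left-to-right pass places the gaps at the front.
def Pre_local_align (p : String) (x : String) (i : Int) (edits : String) : Prop :=
  0 ≤ i ∨ edits.toList = List.replicate edits.toList.length 'M'
instance (p : String) (x : String) (i : Int) (edits : String) : Decidable (Pre_local_align p x i edits) := by unfold Pre_local_align; infer_instance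
def pvWitness_local_align : String × String × Int × String := ("ACCACAGTCATA", "GTACAGAGTACAAA", 2, "MDMMMMMMIMMMM")

def Spec_local_align (p : String) (x : String) (i : Int) (edits : String) (out : String × String) : Prop := out = local_align_alt p x i edits
instance (p : String) (x : String) (i : Int) (edits : String) (out : String × String) : Decidable (Spec_local_align p x i edits out) := by unfold Spec_local_align; infer_instance

-- ===== CLAIM (what is proved, stated in full; the proofs are below) =====
def Claim_equal_local_align : Prop := ∀ (p : String) (x : String) (i : Int) (edits : String), Dom_local_align p x i edits → Pre_local_align p x i edits → Spec_local_align p x i edits (local_align p x i edits)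

-- ===== LEMMAS AND PROOFS =====

lemma laLoop_stop (el : List Char) (m j : Int) (pn xn : List Char) (h : ¬ j < m) :
    laLoop el m j pn xn = (pn, xn) := by
  rw [laLoop]; simp [h]

lemma laLoop_none (el : List Char) (m j : Int) (pn xn : List Char) (h : j < m)
    (hg : PySem.List.pyGet? el j = none) : laLoop el m j pn xn = (pn, xn) := by
  rw [laLoop]; simp [h, hg]

lemma laLoop_M (el : List Char) (m j : Int) (pn xn : List Char) (h : j < m)
    (hg : PySem.List.pyGet? el j = some 'M') :
    laLoop el m j pn xn = laLoop el m (j + 1) pn xn := by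
  rw [laLoop]; simp [h, hg]

lemma laLoop_D (el : List Char) (m j : Int) (pn xn : List Char) (h : j < m)
    (hg : PySem.List.pyGet? el j = some 'D') :
    laLoop el m j pn xn = laLoop el m (j + 1) pn (laInsert j xn) := by
  rw [laLoop]; simp [h, hg]

lemma laLoop_I (el : List Char) (m j : Int) (pn xn : List Char) (e : Char) (h : j < m)
    (hg : PySem.List.pyGet? el j = some e) (hM : ¬ e = 'M') (hD : ¬ e = 'D') :
    laLoop el m j pn xn = laLoop el m (j + 1) (laInsert j pn) xn := by
  rw [laLoop]; simp [h, hg, hM, hD]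

lemma blLoop_stop (el : List Char) (gap : Char → Bool) (m j : Int) (out rest : List Char)
    (h : ¬ j < m) : blLoop el gap m j out rest = out ++ rest := by
  rw [blLoop]; simp [h]

lemma blLoop_none (el : List Char) (gap : Char → Bool) (m j : Int) (out rest : List Char)
    (h : j < m) (hg : PySem.List.pyGet? el j = none) :
    blLoop el gap m j out rest = out ++ rest := by
  rw [blLoop]; simp [h, hg]

lemma blLoop_skip (el : List Char) (gap : Char → Bool) (m j : Int) (out rest : List Char)
    (e : Char) (h : j < m) (hg : PySem.List.pyGet? el j = some e) (hgap : gap e = false) :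
    blLoop el gap m j out rest = blLoop el gap m (j + 1) out rest := by
  rw [blLoop]; simp [h, hg, hgap]

lemma blLoop_gap (el : List Char) (gap : Char → Bool) (m j : Int) (out rest : List Char)
    (e : Char) (h : j < m) (hg : PySem.List.pyGet? el j = some e) (hgap : gap e = true) :
    blLoop el gap m j out rest
      = blLoop el gap m (j + 1) ((fillTo j out rest).1 ++ ['-']) (fillTo j out rest).2 := by
  rw [blLoop]; simp [h, hg, hgap]

lemma fill_spec (j : Int) (hj : 0 ≤ j) :
    ∀ (rest out : List Char), (out.length : Int) ≤ j →
      laInsert j (out ++ rest) = (fillTo j out rest).1 ++ '-' :: (fillTo j out rest).2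
      ∧ ((fillTo j out rest).1.length : Int) ≤ j := by
  intro rest
  induction rest with
  | nil =>
      intro out hlen
      have h1 : out.take j.toNat = out := List.take_of_length_le (by omega)
      have h2 : out.drop j.toNat = [] := List.drop_eq_nil_of_le (by omega)
      rw [fillTo]
      unfold laInsert
      rw [List.append_nil]
      rw [PySem.List.slice_to out hj, PySem.List.slice_from out hj]
      simp [h1, h2, hlen]
  | cons c cs ih =>
      intro out hlen
      by_cases hlt : (out.length : Int) < j
      · have hstep : out ++ c :: cs = (out ++ [c]) ++ cs := by simp
        have := ih (out ++ [c]) (by simp; omega)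
        simp only [fillTo, if_pos hlt]
        rw [hstep]
        exact this
      · have heq : j.toNat = out.length := by omega
        have h1 : (out ++ c :: cs).take j.toNat = out := by
          rw [heq]; exact List.take_left
        have h2 : (out ++ c :: cs).drop j.toNat = c :: cs := by
          rw [heq]; exact List.drop_left
        simp only [fillTo, if_neg hlt]
        unfold laInsert
        rw [PySem.List.slice_to (out ++ c :: cs) hj, PySem.List.slice_from (out ++ c :: cs) hj]
        simp [h1, h2, hlen]

lemma loop_eq (el : List Char) (m : Int) :
    ∀ (n : Nat) (j : Int), (m - j).toNat = n → 0 ≤ j →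
      ∀ (op rp ox rx : List Char), (op.length : Int) ≤ j → (ox.length : Int) ≤ j →
        laLoop el m j (op ++ rp) (ox ++ rx)
          = (blLoop el (fun e => !(e == 'M') && !(e == 'D')) m j op rp,
             blLoop el (fun e => e == 'D') m j ox rx) := by
  intro n
  induction n with
  | zero =>
      intro j hn hj op rp ox rx hop hox
      have hm : ¬ j < m := by omega
      rw [laLoop_stop el m j _ _ hm, blLoop_stop _ _ _ _ _ _ hm, blLoop_stop _ _ _ _ _ _ hm]
  | succ n ih =>
      intro j hn hj op rp ox rx hop hox
      by_cases hm : j < m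
      · cases hg : PySem.List.pyGet? el j with
        | none =>
            rw [laLoop_none el m j _ _ hm hg, blLoop_none _ _ _ _ _ _ hm hg,
              blLoop_none _ _ _ _ _ _ hm hg]
        | some e =>
            by_cases hM : e = 'M'
            · subst hM
              rw [laLoop_M el m j _ _ hm hg,
                blLoop_skip _ _ _ _ _ _ 'M' hm hg (by decide),
                blLoop_skip _ _ _ _ _ _ 'M' hm hg (by decide)]
              exact ih (j + 1) (by omega) (by omega) op rp ox rx (by omega) (by omega)
            · by_cases hD : e = 'D'
              · subst hD
                rw [laLoop_D el m j _ _ hm hg,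
                  blLoop_skip _ _ _ _ _ _ 'D' hm hg (by decide),
                  blLoop_gap _ _ _ _ _ _ 'D' hm hg (by decide)]
                obtain ⟨h1, h2⟩ := fill_spec j hj rx ox hox
                rw [h1]
                have hrec := ih (j + 1) (by omega) (by omega) op rp
                  ((fillTo j ox rx).1 ++ ['-']) (fillTo j ox rx).2 (by omega) (by simp; omega)
                simpa using hrec
              · rw [laLoop_I el m j _ _ e hm hg hM hD,
                  blLoop_gap _ _ _ _ _ _ e hm hg (by simp [hM, hD]),
                  blLoop_skip _ _ _ _ _ _ e hm hg (by simp [hD])]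
                obtain ⟨h1, h2⟩ := fill_spec j hj rp op hop
                rw [h1]
                have hrec := ih (j + 1) (by omega) (by omega)
                  ((fillTo j op rp).1 ++ ['-']) (fillTo j op rp).2 ox rx (by simp; omega) (by omega)
                simpa using hrec
      · rw [laLoop_stop el m j _ _ hm, blLoop_stop _ _ _ _ _ _ hm, blLoop_stop _ _ _ _ _ _ hm]

lemma allM_iff (l : List Char) : l = List.replicate l.length 'M' ↔ l.all (· == 'M') = true := by
  rw [List.eq_replicate_iff]
  simp [List.all_eq_true]

-- ===== VERDICT (by name: the statement is the Claim_ definition above) =====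
theorem local_align_spec : Claim_equal_local_align := by
  intro p x i edits _hdom hpre
  unfold Spec_local_align local_align local_align_alt
  by_cases h1 : p.toList = [] ∧ x.toList = [] ∧ edits.toList = []
  · simp [h1]
  · simp only [if_neg h1]
    by_cases h2 : edits.toList = List.replicate edits.toList.length 'M'
    · rw [if_pos h2, if_pos ((allM_iff _).mp h2)]
    · rw [if_neg h2, if_neg (fun hc => h2 ((allM_iff _).mpr hc))]
      have hi : 0 ≤ i := by
        rcases hpre with hi | hM
        · exact hi
        · exact absurd hM h2
      have hmain := loop_eq edits.toList (edits.toList.length : Int)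
        ((edits.toList.length : Int) - i).toNat i rfl hi
        [] p.toList [] (PySem.List.slice x.toList (some i) none)
        (by simpa using hi) (by simpa using hi)
      simp only [List.nil_append] at hmain
      rw [hmain]
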